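-- pv_equiv track=rewrite | github.com/patata22/BOJ | 백준/Bronze/33937. 태권도와 복싱을 합한 운동/태권도와 복싱을 합한 운동.py | parse
-- ===== SOURCE A (Python) =====
-- def parse(X):
--     flag=False
--     result=[]
--     for x in X:
--         if x in 'aeiou':
--             flag=True
--             result.append(x)
--         else:
--             if flag: return ''.join(result)
--             else: result.append(x)
--     return ''
-- ===== SOURCE B (Python) =====
-- def parse(X):
--     vowels = set('aeiou')
--     v = next((i for i, c in enumerate(X) if c in vowels), None)
--     if v is None:
--         return ''
--     for j in range(v + 1, len(X)):
--         if X[j] not in vowels: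
--             return X[:j]
--     return ''
-- ===== Notes on version B (the rewrite author's own statement) =====
-- stated objective: alternative
-- what changed: Replaced the single accumulator-building state machine (flag + growing result list) with two index-finding scans: find the first vowel index v, then the first non-vowel index j after it, and return the slice X[:j] ('' if either scan fails).
import Mathlib
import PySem

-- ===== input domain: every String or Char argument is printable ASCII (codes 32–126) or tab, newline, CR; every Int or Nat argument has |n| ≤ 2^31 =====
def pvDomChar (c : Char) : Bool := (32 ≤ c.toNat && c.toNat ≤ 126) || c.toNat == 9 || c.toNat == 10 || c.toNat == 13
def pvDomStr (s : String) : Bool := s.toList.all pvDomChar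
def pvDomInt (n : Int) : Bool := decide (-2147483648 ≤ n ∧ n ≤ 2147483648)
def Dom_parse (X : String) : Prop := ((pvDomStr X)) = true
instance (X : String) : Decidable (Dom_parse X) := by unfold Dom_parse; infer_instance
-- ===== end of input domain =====

-- B replaces A's flag+accumulator state machine by two index-finding scans and a slice (alternative decomposition, same cost).


-- ===== PORT A =====
-- `x in 'aeiou'`
def pvIsVowel (c : Char) : Bool := c == 'a' || c == 'e' || c == 'i' || c == 'o' || c == 'u'

-- A's for-loop: state = (flag, result); early return on a non-vowel after the flag is set.
def parseLoopA : List Char → Bool → List Char → String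
  | [], _, _ => ""
  | x :: xs, flag, result =>
    if pvIsVowel x then parseLoopA xs true (result ++ [x])
    else if flag then String.mk result
    else parseLoopA xs flag (result ++ [x])

def parse (X : String) : String := parseLoopA X.toList false []

-- ===== PORT B =====
-- first scan: index of the first vowel; second scan: first non-vowel after it; slice X[:j].
def parse_alt (X : String) : String :=
  let cs := X.toList
  match cs.findIdx? pvIsVowel with
  | none => ""
  | some v =>
    match (cs.drop (v + 1)).findIdx? (fun c => !pvIsVowel c) with
    | none => ""
    | some k => String.mk (cs.take (v + 1 + k))

-- ===== PRECONDITION & SPEC =====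
def Spec_parse (X : String) (out : String) : Prop := out = parse_alt X
instance (X : String) (out : String) : Decidable (Spec_parse X out) := by unfold Spec_parse; infer_instance

-- ===== CLAIM (what is proved, stated in full; the proofs are below) =====
def Claim_equal_parse : Prop := ∀ (X : String), Dom_parse X → Spec_parse X (parse X)

-- ===== LEMMAS AND PROOFS =====
-- flag = true phase: result is acc ++ (vowel prefix); returns at the first non-vowel.
theorem parseLoopA_true (cs : List Char) : ∀ acc : List Char,
    parseLoopA cs true acc =
      match cs.findIdx? (fun c => !pvIsVowel c) with
      | none => ""
      | some k => String.mk (acc ++ cs.take k) := by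
  induction cs with
  | nil => intro acc; simp [parseLoopA]
  | cons x xs ih =>
    intro acc
    by_cases hx : pvIsVowel x = true
    · simp [parseLoopA, hx, List.findIdx?_cons, ih]
      cases h : xs.findIdx? (fun c => !pvIsVowel c) with
      | none => simp
      | some k => simp [List.take_succ_cons]
    · simp [parseLoopA, hx, List.findIdx?_cons]

-- flag = false phase: everything up to and including the first vowel is accumulated.
theorem parseLoopA_false (cs : List Char) : ∀ acc : List Char,
    parseLoopA cs false acc =
      match cs.findIdx? pvIsVowel with
      | none => ""
      | some v =>
        match (cs.drop (v + 1)).findIdx? (fun c => !pvIsVowel c) with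
        | none => ""
        | some k => String.mk (acc ++ cs.take (v + 1 + k)) := by
  induction cs with
  | nil => intro acc; simp [parseLoopA]
  | cons x xs ih =>
    intro acc
    by_cases hx : pvIsVowel x = true
    · simp [parseLoopA, hx, List.findIdx?_cons, parseLoopA_true]
      cases h : xs.findIdx? (fun c => !pvIsVowel c) with
      | none => simp
      | some k => simp [Nat.add_comm 1 k, List.take_succ_cons]
    · simp [parseLoopA, hx, List.findIdx?_cons, ih]
      cases h : xs.findIdx? pvIsVowel with
      | none => simp
      | some v =>
        simp only [Option.map_some]
        cases h2 : (xs.drop (v + 1)).findIdx? (fun c => !pvIsVowel c) with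
        | none => simp
        | some k =>
          have : v + 1 + 1 + k = (v + 1 + k) + 1 := by omega
          simp [List.take_succ_cons, this]

-- ===== VERDICT (by name: the statement is the Claim_ definition above) =====
theorem parse_spec : Claim_equal_parse := by
  intro X _
  unfold Spec_parse parse parse_alt
  rw [parseLoopA_false]
  cases h : X.toList.findIdx? pvIsVowel with
  | none => simp [h]
  | some v =>
    cases h2 : (X.toList.drop (v + 1)).findIdx? (fun c => !pvIsVowel c) with
    | none => simp [h, h2]
    | some k => simp [h, h2, List.take_add]
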